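-- pv_equiv track=rewrite | github.com/adobortnik/Hydra | run_device.py | _parse_time_windows
-- ===== SOURCE A (Python) =====
-- def _parse_time_windows(start_str, end_str):
--     """
--     Parse start_time/end_time into list of (start, end) tuples.
--     Supports comma-separated multi-windows: start="2,12" end="4,14" -> [(2,4), (12,14)]
--     Single window: start="8" end="16" -> [(8,16)]
--     Always-active: start="0" end="0" -> [(0,0)]
--     """
--     starts = [int(x.strip()) for x in str(start_str or "0").split(",") if x.strip().isdigit()]
--     ends = [int(x.strip()) for x in str(end_str or "0").split(",") if x.strip().isdigit()]
--
--     if not starts: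
--         starts = [0]
--     if not ends:
--         ends = [0]
--
--     # Pad shorter list to match longer
--     while len(ends) < len(starts):
--         ends.append(ends[-1])
--     while len(starts) < len(ends):
--         starts.append(starts[-1])
--
--     return list(zip(starts, ends))
-- ===== SOURCE B (Python) =====
-- def _parse_time_windows(start_str, end_str):
--     def nums(toks):
--         if not toks:
--             return []
--         t = toks[0].strip()
--         rest = nums(toks[1:])
--         return [int(t)] + rest if t.isdigit() else rest
--
--     def pair(ss, es, ps, pe):
--         if not ss and not es:
--             return []
--         s = ss[0] if ss else ps
--         e = es[0] if es else pe
--         return [(s, e)] + pair(ss[1:], es[1:], s, e)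
--
--     starts = nums(str(start_str or "0").split(",")) or [0]
--     ends = nums(str(end_str or "0").split(",")) or [0]
--     return pair(starts, ends, 0, 0)
-- ===== Notes on version B (the rewrite author's own statement) =====
-- stated objective: alternative
-- what changed: Replaces A's staged comprehension parsing plus two in-place while-padding loops plus zip by two structural recursions: a recursive tokenizer and a single recursive co-traversal of both lists that carries the last seen start/end values, so the result pairs are built directly with no list mutation, padding, zip or indexing.
import Mathlib
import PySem

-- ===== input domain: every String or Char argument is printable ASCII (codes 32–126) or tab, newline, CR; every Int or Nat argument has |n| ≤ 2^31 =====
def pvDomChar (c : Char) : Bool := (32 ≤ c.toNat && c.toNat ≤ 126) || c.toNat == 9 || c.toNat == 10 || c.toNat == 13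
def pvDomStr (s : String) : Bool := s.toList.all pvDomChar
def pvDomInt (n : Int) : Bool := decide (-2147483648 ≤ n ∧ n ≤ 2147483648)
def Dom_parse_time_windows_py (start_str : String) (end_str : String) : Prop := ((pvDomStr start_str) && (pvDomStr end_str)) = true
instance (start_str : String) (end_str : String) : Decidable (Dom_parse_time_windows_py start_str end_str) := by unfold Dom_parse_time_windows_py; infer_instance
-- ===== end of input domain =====

-- B replaces A's comprehension parsing + two in-place padding loops + zip by a recursive
-- tokenizer and one recursive co-traversal carrying the last seen start/end values
-- (objective: an alternative, mutation-free decomposition of the same task).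

-- ===== PORT A =====
-- [int(x.strip()) for x in str(s or "0").split(",") if x.strip().isdigit()]
-- (int(...) via ofStr?.getD 0; the isdigit guard guarantees the parse succeeds)
def pvParseList (s : String) : List Int :=
  (((PySem.Str.split? (if s = "" then "0" else s) ",").getD []).filter
      (fun x => PySem.Str.strIsdigit (PySem.Str.strip x))).map
    (fun x => (PySem.Int.ofStr? (PySem.Str.strip x)).getD 0)

-- 'while len(l) < n: l.append(l[-1])'
def pvPad (l : List Int) (n : Nat) : List Int :=
  if l.length < n then pvPad (l ++ [PySem.List.pyGetD l (-1) 0]) n else l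
termination_by n - l.length
decreasing_by simp; omega

def parse_time_windows_py (start_str : String) (end_str : String) : List (Int × Int) :=
  let starts := pvParseList start_str
  let ends := pvParseList end_str
  let starts := if starts = [] then [0] else starts
  let ends := if ends = [] then [0] else ends
  let ends := pvPad ends starts.length
  let starts := pvPad starts ends.length
  starts.zip ends

-- ===== PORT B =====
-- recursive 'nums' over the token list
def pvNums : List String → List Int
  | [] => []
  | t :: ts =>
    let x := PySem.Str.strip t
    let rest := pvNums ts
    if PySem.Str.strIsdigit x then ((PySem.Int.ofStr? x).getD 0) :: rest else rest

-- recursive 'pair(ss, es, ps, pe)' carrying the last seen values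
def pvPair (ss es : List Int) (ps pe : Int) : List (Int × Int) :=
  if ss = [] ∧ es = [] then []
  else
    let s := ss.headD ps
    let e := es.headD pe
    (s, e) :: pvPair ss.tail es.tail s e
termination_by ss.length + es.length
decreasing_by
  cases ss <;> cases es <;> simp_all <;> omega

def parse_time_windows_py_alt (start_str : String) (end_str : String) : List (Int × Int) :=
  let starts := pvNums ((PySem.Str.split? (if start_str = "" then "0" else start_str) ",").getD [])
  let ends := pvNums ((PySem.Str.split? (if end_str = "" then "0" else end_str) ",").getD [])
  let starts := if starts = [] then [0] else starts
  let ends := if ends = [] then [0] else ends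
  pvPair starts ends 0 0

-- ===== PRECONDITION & SPEC =====
def Spec_parse_time_windows_py (start_str : String) (end_str : String) (out : List (Int × Int)) : Prop := out = parse_time_windows_py_alt start_str end_str
instance (start_str : String) (end_str : String) (out : List (Int × Int)) : Decidable (Spec_parse_time_windows_py start_str end_str out) := by unfold Spec_parse_time_windows_py; infer_instance

-- ===== CLAIM (what is proved, stated in full; the proofs are below) =====
def Claim_equal_parse_time_windows_py : Prop := ∀ (start_str : String) (end_str : String), Dom_parse_time_windows_py start_str end_str → Spec_parse_time_windows_py start_str end_str (parse_time_windows_py start_str end_str)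

-- ===== LEMMAS AND PROOFS =====

theorem pvNums_eq (l : List String) :
    pvNums l = (l.filter (fun x => PySem.Str.strIsdigit (PySem.Str.strip x))).map
      (fun x => (PySem.Int.ofStr? (PySem.Str.strip x)).getD 0) := by
  induction l with
  | nil => rfl
  | cons t ts ih =>
    simp only [pvNums, List.filter_cons]
    split <;> simp_all [List.map_cons]

theorem pvPad_eq (n : Nat) (l : List Int) (h : l ≠ []) :
    pvPad l n = l ++ List.replicate (n - l.length) (l.getLast h) := by
  rw [pvPad]
  split
  next hlt =>
    have h2 : l ++ [PySem.List.pyGetD l (-1) 0] ≠ [] := by simp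
    rw [pvPad_eq n _ h2]
    have hx : PySem.List.pyGetD l (-1) 0 = l.getLast h := PySem.List.pyGetD_neg_one l 0 h
    have hn : n - l.length = (n - (l.length + 1)) + 1 := by omega
    simp only [hx, List.length_append, List.length_cons, List.length_nil]
    rw [List.append_assoc, hn, List.replicate_succ]
    simp
  next hge =>
    have h0 : n - l.length = 0 := by omega
    simp [h0]
termination_by n - l.length
decreasing_by simp; omega

theorem pvPair_eq (a b : List Int) (fs fe : Int) :
    pvPair a b fs fe =
      (a ++ List.replicate (max a.length b.length - a.length) (a.getLastD fs)).zip
      (b ++ List.replicate (max a.length b.length - b.length) (b.getLastD fe)) := by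
  rw [pvPair]
  split
  next hc => simp [hc.1, hc.2]
  next hc =>
    match a, b with
    | [], [] => exact absurd ⟨rfl, rfl⟩ hc
    | [], e :: es =>
      simp only [List.headD_nil, List.headD_cons, List.tail_nil, List.tail_cons]
      rw [pvPair_eq [] es fs e]
      simp [List.replicate_succ]
    | s :: ss, [] =>
      simp only [List.headD_nil, List.headD_cons, List.tail_nil, List.tail_cons]
      rw [pvPair_eq ss [] s fe]
      simp [List.replicate_succ]
    | s :: ss, e :: es =>
      simp only [List.headD_cons, List.tail_cons]
      rw [pvPair_eq ss es s e]
      simp only [List.length_cons, List.getLastD_cons, List.cons_append]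
      have h1 : max (ss.length + 1) (es.length + 1) - (ss.length + 1)
          = max ss.length es.length - ss.length := by omega
      have h2 : max (ss.length + 1) (es.length + 1) - (es.length + 1)
          = max ss.length es.length - es.length := by omega
      rw [h1, h2]
      simp [List.zip_cons_cons]
termination_by a.length + b.length
decreasing_by all_goals simp <;> omega

theorem pvGetLastD_eq (l : List Int) (h : l ≠ []) (d : Int) :
    l.getLastD d = l.getLast h := by
  simp [List.getLastD_eq_getLast?, List.getLast?_eq_some_getLast h]

theorem pair_eq_padzip (a b : List Int) (ha : a ≠ []) (hb : b ≠ []) :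
    pvPair a b 0 0 = (pvPad a (pvPad b a.length).length).zip (pvPad b a.length) := by
  have hb' : pvPad b a.length
      = b ++ List.replicate (max a.length b.length - b.length) (b.getLast hb) := by
    rw [pvPad_eq _ b hb]
    have hc : a.length - b.length = max a.length b.length - b.length := by omega
    rw [hc]
  have hlen : (pvPad b a.length).length = max a.length b.length := by
    rw [hb']; simp
  have ha' : pvPad a (pvPad b a.length).length
      = a ++ List.replicate (max a.length b.length - a.length) (a.getLast ha) := by
    rw [hlen, pvPad_eq _ a ha]
  rw [ha', hb', pvPair_eq, pvGetLastD_eq a ha 0, pvGetLastD_eq b hb 0]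

-- ===== VERDICT (by name: the statement is the Claim_ definition above) =====
theorem parse_time_windows_py_spec : Claim_equal_parse_time_windows_py := by
  intro s e _
  show parse_time_windows_py s e = parse_time_windows_py_alt s e
  unfold parse_time_windows_py parse_time_windows_py_alt pvParseList
  rw [← pvNums_eq, ← pvNums_eq]
  have nz : ∀ l : List Int, (if l = [] then ([0] : List Int) else l) ≠ [] := by
    intro l; split <;> simp_all
  exact (pair_eq_padzip _ _ (nz _) (nz _)).symm
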